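-- pv_equiv track=rewrite | github.com/whispr-dev/ulam-prime-spiral-3d | src/ulam-3d.py | cubic_shell_points
-- ===== SOURCE A (Python) =====
-- from typing import Dict, Iterable, List, Tuple
--
-- Vec3 = Tuple[int, int, int]
--
-- def cubic_shell_points(r: int) -> Iterable[Vec3]:
--     """
--     Yield all integer lattice points on the surface of the cube
--     with Chebyshev radius r: max(|x|,|y|,|z|) == r.
--
--     Deterministic order: lexicographic over (x, y, z).
--     """
--     if r == 0:
--         yield (0, 0, 0)
--         return
--
--     rng = range(-r, r + 1)
--     for x in rng:
--         for y in rng: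
--             for z in rng:
--                 if max(abs(x), abs(y), abs(z)) == r:
--                     yield (x, y, z)
-- ===== SOURCE B (Python) =====
-- def cubic_shell_points(r):
--     """
--     Yield all integer lattice points on the surface of the cube
--     with Chebyshev radius r: max(|x|,|y|,|z|) == r.
--
--     Deterministic order: lexicographic over (x, y, z).
--     Direct surface enumeration: O(r^2) points emitted with no filtering scan.
--     """
--     if r == 0:
--         yield (0, 0, 0)
--         return
--     rng = range(-r, r + 1)
--     for x in rng:
--         if abs(x) == r:
--             # whole face: every (y, z) is on the surface
--             for y in rng:
--                 for z in rng:
--                     yield (x, y, z)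
--         else:
--             for y in rng:
--                 if abs(y) == r:
--                     for z in rng:
--                         yield (x, y, z)
--                 else:
--                     # interior (x, y): only the two extreme z values
--                     yield (x, y, -r)
--                     yield (x, y, r)
-- ===== Notes on version B (the rewrite author's own statement) =====
-- stated objective: faster
-- what changed: Instead of scanning the full (2r+1)^3 cube and filtering by max(|x|,|y|,|z|)==r, B enumerates only the surface directly: full (y,z) squares on the two x-faces, full z rows when |y|==r, and just the two extreme z values otherwise, in the same lexicographic order.
import Mathlib
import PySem

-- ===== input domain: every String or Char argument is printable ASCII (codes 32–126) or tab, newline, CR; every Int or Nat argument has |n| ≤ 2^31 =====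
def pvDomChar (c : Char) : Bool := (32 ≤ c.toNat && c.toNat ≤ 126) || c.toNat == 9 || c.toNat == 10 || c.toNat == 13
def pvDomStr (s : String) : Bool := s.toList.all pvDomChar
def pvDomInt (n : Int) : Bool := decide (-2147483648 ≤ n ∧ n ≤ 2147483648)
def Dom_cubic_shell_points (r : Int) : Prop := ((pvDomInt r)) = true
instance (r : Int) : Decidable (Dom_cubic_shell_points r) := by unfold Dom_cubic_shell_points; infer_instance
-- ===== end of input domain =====

-- B enumerates only the cube surface directly (O(r^2) points) instead of filtering the full (2r+1)^3 cube; same lexicographic output.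

-- ===== PORT A =====
-- literal port of A: triple loop over range(-r, r+1) filtered by max(|x|,|y|,|z|) == r
def cubic_shell_points (r : Int) : List (Int × Int × Int) :=
  if r = 0 then [(0, 0, 0)]
  else
    let rng := PySem.List.pyRange (-r) (r + 1) 1
    rng.flatMap (fun x =>
      rng.flatMap (fun y =>
        rng.filterMap (fun z =>
          if max (max |x| |y|) |z| = r then some (x, y, z) else none)))

-- ===== PORT B =====
-- literal port of B: faces for |x| = r, rows for |y| = r, else the two extreme z values
def cubic_shell_points_alt (r : Int) : List (Int × Int × Int) :=
  if r = 0 then [(0, 0, 0)]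
  else
    let rng := PySem.List.pyRange (-r) (r + 1) 1
    rng.flatMap (fun x =>
      if |x| = r then
        rng.flatMap (fun y => rng.map (fun z => (x, y, z)))
      else
        rng.flatMap (fun y =>
          if |y| = r then rng.map (fun z => (x, y, z))
          else [(x, y, -r), (x, y, r)]))

-- ===== PRECONDITION & SPEC =====
def Spec_cubic_shell_points (r : Int) (out : List (Int × Int × Int)) : Prop := out = cubic_shell_points_alt r
instance (r : Int) (out : List (Int × Int × Int)) : Decidable (Spec_cubic_shell_points r out) := by unfold Spec_cubic_shell_points; infer_instance

-- ===== CLAIM (what is proved, stated in full; the proofs are below) =====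
def Claim_equal_cubic_shell_points : Prop := ∀ (r : Int), Dom_cubic_shell_points r → Spec_cubic_shell_points r (cubic_shell_points r)

-- ===== LEMMAS AND PROOFS =====

-- flatMap congruence on members
theorem pv_flatMap_congr {α β : Type} {l : List α} {f g : α → List β}
    (h : ∀ a ∈ l, f a = g a) : l.flatMap f = l.flatMap g := by
  induction l with
  | nil => rfl
  | cons a l ih =>
    simp only [List.flatMap_cons]
    rw [h a (by simp), ih (fun a ha => h a (by simp [ha]))]

-- a filterMap whose condition always holds is a map
theorem pv_filterMap_all {α β : Type} {l : List α} {p : α → Prop} [DecidablePred p] {f : α → β}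
    (h : ∀ a ∈ l, p a) :
    l.filterMap (fun a => if p a then some (f a) else none) = l.map f := by
  induction l with
  | nil => rfl
  | cons a l ih =>
    simp only [List.filterMap_cons, List.map_cons, if_pos (h a (by simp))]
    rw [ih (fun a ha => h a (by simp [ha]))]

-- a filterMap whose condition never holds is empty
theorem pv_filterMap_none {α β : Type} {l : List α} {p : α → Prop} [DecidablePred p] {f : α → β}
    (h : ∀ a ∈ l, ¬ p a) :
    l.filterMap (fun a => if p a then some (f a) else none) = [] := by
  induction l with
  | nil => rfl
  | cons a l ih =>
    simp only [List.filterMap_cons, if_neg (h a (by simp))]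
    exact ih (fun a ha => h a (by simp [ha]))

-- A's z-scan, when |x| < r and |y| < r, keeps only z = -r and z = r
theorem pv_inner_edge (r x y : Int) (hr : 0 < r) (hx : |x| < r) (hy : |y| < r) :
    (PySem.List.pyRange (-r) (r + 1) 1).filterMap
      (fun z => if max (max |x| |y|) |z| = r then some (x, y, z) else none)
      = [(x, y, -r), (x, y, r)] := by
  rw [PySem.List.pyRange_one_append (-r) (-r + 1) (r + 1) (by omega) (by omega),
      PySem.List.pyRange_one_append (-r + 1) r (r + 1) (by omega) (by omega),
      PySem.List.pyRange_one_singleton]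
  have hrr : PySem.List.pyRange r (r + 1) 1 = [r] := PySem.List.pyRange_one_singleton r
  rw [hrr]
  simp only [List.filterMap_append]
  have hmid : (PySem.List.pyRange (-r + 1) r 1).filterMap
      (fun z => if max (max |x| |y|) |z| = r then some (x, y, z) else none) = [] := by
    apply pv_filterMap_none
    intro z hz
    rw [PySem.List.mem_pyRange_one] at hz
    have : |z| < r := by
      rcases abs_cases z with ⟨h, _⟩ | ⟨h, _⟩ <;> omega
    rcases max_cases (max |x| |y|) |z| with ⟨he, _⟩ | ⟨he, _⟩ <;>
      rcases max_cases |x| |y| with ⟨he2, _⟩ | ⟨he2, _⟩ <;> omega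
  rw [hmid]
  have habs : |(-r)| = r := by rw [abs_neg]; exact abs_of_pos hr
  have habs2 : |r| = r := abs_of_pos hr
  simp only [List.filterMap_cons, List.filterMap_nil, habs, habs2]
  rw [if_pos (by rcases max_cases |x| |y| with ⟨he, _⟩ | ⟨he, _⟩ <;> omega),
      if_pos (by rcases max_cases |x| |y| with ⟨he, _⟩ | ⟨he, _⟩ <;> omega)]
  rfl

-- A's z-scan, when max(|x|,|y|) = r, keeps every z of the range
theorem pv_inner_full (r x y : Int) (hxy : max |x| |y| = r) :
    (PySem.List.pyRange (-r) (r + 1) 1).filterMap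
      (fun z => if max (max |x| |y|) |z| = r then some (x, y, z) else none)
      = (PySem.List.pyRange (-r) (r + 1) 1).map (fun z => (x, y, z)) := by
  apply pv_filterMap_all
  intro z hz
  rw [PySem.List.mem_pyRange_one] at hz
  have : |z| ≤ r := by
    rcases abs_cases z with ⟨h, _⟩ | ⟨h, _⟩ <;> omega
  rw [hxy]
  omega

-- ===== VERDICT (by name: the statement is the Claim_ definition above) =====
theorem cubic_shell_points_spec : Claim_equal_cubic_shell_points := by
  intro r _
  unfold Spec_cubic_shell_points cubic_shell_points cubic_shell_points_alt
  by_cases h0 : r = 0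
  · simp [h0]
  rw [if_neg h0, if_neg h0]
  by_cases hneg : r < 0
  · rw [PySem.List.pyRange_one_eq_nil (by omega)]
    rfl
  have hr : 0 < r := by omega
  apply pv_flatMap_congr
  intro x hx
  rw [PySem.List.mem_pyRange_one] at hx
  have hxr : |x| ≤ r := by rcases abs_cases x with ⟨h, _⟩ | ⟨h, _⟩ <;> omega
  by_cases hxe : |x| = r
  · rw [if_pos hxe]
    apply pv_flatMap_congr
    intro y hy
    rw [PySem.List.mem_pyRange_one] at hy
    have hyr : |y| ≤ r := by rcases abs_cases y with ⟨h, _⟩ | ⟨h, _⟩ <;> omega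
    exact pv_inner_full r x y (by omega)
  · rw [if_neg hxe]
    apply pv_flatMap_congr
    intro y hy
    rw [PySem.List.mem_pyRange_one] at hy
    have hyr : |y| ≤ r := by rcases abs_cases y with ⟨h, _⟩ | ⟨h, _⟩ <;> omega
    by_cases hye : |y| = r
    · rw [if_pos hye]
      exact pv_inner_full r x y (by omega)
    · rw [if_neg hye]
      exact pv_inner_edge r x y hr (by omega) (by omega)
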